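-- pv_equiv track=rewrite | github.com/Ognen42/efficient-theorem-proving | lean_pruning_pipeline.py | split_solution_into_chunks
-- ===== SOURCE A (Python) =====
-- from typing import List, Dict, Tuple, Optional
--
-- def split_solution_into_chunks(solution_text: str) -> List[str]:
--     """Split a solution into sentence-level chunks, stripping <think> tags."""
--     if "<think>" in solution_text:
--         solution_text = solution_text.split("<think>")[1].strip()
--     if "</think>" in solution_text:
--         solution_text = solution_text.split("</think>")[0].strip()
--
--     sentence_ending_tokens = [".", "?", "!"]
--     paragraph_ending_patterns = ["\n\n", "\r\n\r\n"]
--     chunks = []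
--     current_chunk = ""
--     i = 0
--     while i < len(solution_text):
--         current_chunk += solution_text[i]
--         is_paragraph_end = any(
--             i + len(p) <= len(solution_text) and solution_text[i:i + len(p)] == p
--             for p in paragraph_ending_patterns
--         )
--         is_sentence_end = (
--             i < len(solution_text) - 1
--             and solution_text[i] in sentence_ending_tokens
--             and solution_text[i + 1] in (" ", "\n")
--         )
--         if is_paragraph_end or is_sentence_end:
--             if current_chunk.strip():
--                 chunks.append(current_chunk.strip())
--                 current_chunk = ""
--         i += 1
--
--     # Merge chunks shorter than 10 characters into neighbours
--     i = 0
--     while i < len(chunks):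
--         if len(chunks[i]) < 10:
--             if i == len(chunks) - 1:
--                 if i > 0:
--                     chunks[i - 1] = chunks[i - 1] + " " + chunks[i]
--                     chunks.pop(i)
--             else:
--                 chunks[i + 1] = chunks[i] + " " + chunks[i + 1]
--                 chunks.pop(i)
--             if i == 0 and len(chunks) == 1:
--                 break
--         else:
--             i += 1
--     return chunks
-- ===== SOURCE B (Python) =====
-- from typing import List
--
-- def split_solution_into_chunks(solution_text: str) -> List[str]:
--     """Split a solution into sentence-level chunks, stripping <think> tags.
--
--     Index-based single pass: chunks are cut as slices of the text (no char-by-char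
--     concatenation) and short chunks are merged in one forward pass (no list pops).
--     """
--     if "<think>" in solution_text:
--         solution_text = solution_text.split("<think>")[1].strip()
--     if "</think>" in solution_text:
--         solution_text = solution_text.split("</think>")[0].strip()
--
--     n = len(solution_text)
--     chunks = []
--     start = 0
--     for i in range(n):
--         is_break = (
--             solution_text.startswith("\n\n", i)
--             or solution_text.startswith("\r\n\r\n", i)
--             or (i < n - 1
--                 and solution_text[i] in ".?!"
--                 and solution_text[i + 1] in (" ", "\n"))
--         )
--         if is_break:
--             piece = solution_text[start:i + 1].strip()
--             if piece:
--                 chunks.append(piece)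
--             start = i + 1
--     # note: text after the last break is discarded, as in the original
--
--     # single forward pass: absorb short chunks into the following one;
--     # a short tail goes onto the last emitted chunk (or stands alone)
--     res = []
--     k = 0
--     m = len(chunks)
--     while k < m:
--         cur = chunks[k]
--         k += 1
--         while len(cur) < 10 and k < m:
--             cur = cur + " " + chunks[k]
--             k += 1
--         if len(cur) >= 10 or not res:
--             res.append(cur)
--         else:
--             res[-1] = res[-1] + " " + cur
--     return res
-- ===== Notes on version B (the rewrite author's own statement) =====
-- stated objective: faster
-- what changed: Chunks are cut as index-based slices of the text instead of growing current_chunk one character at a time, and short chunks are merged in a single forward pass with an accumulated current chunk instead of repeatedly rewriting and popping the chunk list in place.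
import Mathlib
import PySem

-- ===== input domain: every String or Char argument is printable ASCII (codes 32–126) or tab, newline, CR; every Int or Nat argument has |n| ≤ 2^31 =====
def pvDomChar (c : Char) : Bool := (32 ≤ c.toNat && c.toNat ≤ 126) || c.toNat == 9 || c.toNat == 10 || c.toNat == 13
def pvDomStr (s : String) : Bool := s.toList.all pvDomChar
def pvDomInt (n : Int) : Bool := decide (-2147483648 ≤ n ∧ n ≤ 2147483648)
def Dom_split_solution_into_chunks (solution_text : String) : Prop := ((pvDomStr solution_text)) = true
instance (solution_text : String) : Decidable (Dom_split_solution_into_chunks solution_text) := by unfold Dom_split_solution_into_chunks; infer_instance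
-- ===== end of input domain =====

-- B replaces A's char-by-char chunk building with index-based slicing and A's
-- pop-based merge loop with a single forward merge pass (objective: faster).

-- Shared think-tag preprocessing: these four Python lines are textually identical
-- in A and in B, so both ports use this one helper.
def pvThinkStrip (s : String) : List Char :=
  let cs := s.toList
  let cs := if PySem.Chars.isIn "<think>".toList cs then
              PySem.Chars.strip (((PySem.Chars.split? cs "<think>".toList).getD []).getD 1 [])
            else cs
  let cs := if PySem.Chars.isIn "</think>".toList cs then
              PySem.Chars.strip (((PySem.Chars.split? cs "</think>".toList).getD []).getD 0 [])
            else cs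
  cs

-- ===== PORT A =====
-- is_paragraph_end / is_sentence_end exactly as A computes them (any(...) over the
-- pattern list; list indexing is in range wherever Python reads it, so getD is exact)
def pvBreakA (cs : List Char) (i : Nat) : Bool :=
  let isPara := [['\n','\n'], ['\r','\n','\r','\n']].any (fun p =>
    decide (i + p.length ≤ cs.length) &&
      (PySem.List.slice cs (some (i : Int)) (some ((i : Int) + (p.length : Int))) == p))
  let isSent := decide (i < cs.length - 1) &&
    (['.','?','!'].contains (cs.getD i ' ')) && ([' ', '\n'].contains (cs.getD (i+1) ' '))
  isPara || isSent

-- A's scanning while-loop: state = (i, chunks, current_chunk), current_chunk grows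
-- one character per step (strings as List Char)
def pvScanA (cs : List Char) (i : Nat) (chunks : List (List Char)) (cur : List Char) :
    List (List Char) :=
  if h : i < cs.length then
    let cur := cur ++ [cs[i]]
    if pvBreakA cs i then
      let st := PySem.Chars.strip cur
      if st ≠ [] then pvScanA cs (i+1) (chunks ++ [st]) []
      else pvScanA cs (i+1) chunks cur   -- Python does NOT reset current_chunk here
    else pvScanA cs (i+1) chunks cur
  else chunks
termination_by cs.length - i

-- A's merging while-loop over the mutable list (pop(i) = eraseIdx; all reads in range)
def pvMergeA (chunks : List (List Char)) (i : Nat) : List (List Char) :=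
  if h : i < chunks.length then
    if (chunks.getD i []).length < 10 then
      if i = chunks.length - 1 then
        if 0 < i then
          -- chunks[i-1] += " " + chunks[i]; chunks.pop(i); (break test is false: i > 0)
          pvMergeA ((chunks.set (i-1) (chunks.getD (i-1) [] ++ [' '] ++ chunks.getD i [])).eraseIdx i) i
        else chunks   -- i = 0 and len = 1: nothing merged, then `break` fires
      else
        let chunks' := (chunks.set (i+1) (chunks.getD i [] ++ [' '] ++ chunks.getD (i+1) [])).eraseIdx i
        if i = 0 ∧ chunks'.length = 1 then chunks' else pvMergeA chunks' i
    else pvMergeA chunks (i+1)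
  else chunks
termination_by chunks.length - i
decreasing_by
  all_goals simp_all [List.length_eraseIdx, List.length_set]
  all_goals omega

def split_solution_into_chunks (solution_text : String) : List String :=
  let cs := pvThinkStrip solution_text
  (pvMergeA (pvScanA cs 0 [] []) 0).map String.ofList

-- ===== PORT B =====
-- B's break test: startswith(pattern, i) (exact as a prefix test on cs.drop i for
-- 0 ≤ i ≤ len) and the same guarded sentence-end test written with i + 1 < n
def pvBreakB (cs : List Char) (i : Nat) : Bool :=
  PySem.Chars.startswith (cs.drop i) ['\n','\n']
  || PySem.Chars.startswith (cs.drop i) ['\r','\n','\r','\n']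
  || (decide (i + 1 < cs.length) &&
       ((".?!".toList).contains (cs.getD i ' ')) && ([' ', '\n'].contains (cs.getD (i+1) ' ')))

-- B's scan: no accumulated string, just the start index of the current chunk;
-- a chunk is one slice solution_text[start:i+1]
def pvScanB (cs : List Char) (start i : Nat) (chunks : List (List Char)) :
    List (List Char) :=
  if i < cs.length then
    if pvBreakB cs i then
      let piece := PySem.Chars.strip (PySem.List.slice cs (some (start : Int)) (some ((i : Int) + 1)))
      pvScanB cs (i+1) (i+1) (if piece ≠ [] then chunks ++ [piece] else chunks)
    else pvScanB cs start (i+1) chunks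
  else chunks
termination_by cs.length - i

-- B's merge: outer loop picks the next chunk as cur, inner loop absorbs following
-- chunks while cur is short, then cur is emitted (onto res, or onto res[-1] at the end)
def pvMergeB (res : List (List Char)) (cur : List Char) (rest : List (List Char)) :
    List (List Char) :=
  match rest with
  | [] => if 10 ≤ cur.length then res ++ [cur]
          else if res = [] then [cur]
          else res.dropLast ++ [res.getLast! ++ [' '] ++ cur]
  | c :: rest' => if 10 ≤ cur.length then pvMergeB (res ++ [cur]) c rest'
                  else pvMergeB res (cur ++ [' '] ++ c) rest'

def pvMergeB0 (chunks : List (List Char)) : List (List Char) :=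
  match chunks with
  | [] => []
  | c :: rest => pvMergeB [] c rest

def split_solution_into_chunks_alt (solution_text : String) : List String :=
  let cs := pvThinkStrip solution_text
  (pvMergeB0 (pvScanB cs 0 0 [])).map String.ofList

-- ===== PRECONDITION & SPEC =====
def Spec_split_solution_into_chunks (solution_text : String) (out : List String) : Prop := out = split_solution_into_chunks_alt solution_text
instance (solution_text : String) (out : List String) : Decidable (Spec_split_solution_into_chunks solution_text out) := by unfold Spec_split_solution_into_chunks; infer_instance

-- ===== CLAIM (what is proved, stated in full; the proofs are below) =====
def Claim_equal_split_solution_into_chunks : Prop := ∀ (solution_text : String), Dom_split_solution_into_chunks solution_text → Spec_split_solution_into_chunks solution_text (split_solution_into_chunks solution_text)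

-- ===== LEMMAS AND PROOFS =====

-- strip ignores an all-whitespace prefix
lemma pvStrip_prepend_space (w x : List Char) (hw : ∀ c ∈ w, PySem.Chars.isspace c) :
    PySem.Chars.strip (w ++ x) = PySem.Chars.strip x := by
  have h : w.dropWhile PySem.Chars.isspace = [] := List.dropWhile_eq_nil_iff.mpr (by simpa using hw)
  simp [PySem.Chars.strip, PySem.Chars.lstrip, List.dropWhile_append, h]

lemma pvStrip_eq_nil_iff (x : List Char) :
    PySem.Chars.strip x = [] ↔ ∀ c ∈ x, PySem.Chars.isspace c := by
  simp only [PySem.Chars.strip, PySem.Chars.rstrip, PySem.Chars.lstrip]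
  rw [List.reverse_eq_nil_iff, List.dropWhile_eq_nil_iff]
  constructor
  · intro h c hc
    have : c ∈ x.takeWhile PySem.Chars.isspace ∨ c ∈ x.dropWhile PySem.Chars.isspace := by
      rw [← List.mem_append, List.takeWhile_append_dropWhile]; exact hc
    rcases this with h1 | h1
    · exact List.mem_takeWhile_imp h1
    · exact h c (by simpa using h1)
  · intro h c hc
    simp only [List.mem_reverse] at hc
    exact h c ((List.dropWhile_sublist _ (l := x)).mem hc)

-- A's guarded slice-comparison = B's startswith-on-drop, at any in-range start
lemma pvStarts_eq (cs : List Char) (i : Nat) (p : List Char) (hi : i ≤ cs.length) :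
    (decide (i + p.length ≤ cs.length) &&
      (PySem.List.slice cs (some (i : Int)) (some ((i : Int) + (p.length : Int))) == p))
    = PySem.Chars.startswith (cs.drop i) p := by
  have hc : ((i : Int) + (p.length : Int)) = ((i + p.length : Nat) : Int) := by push_cast; ring
  rw [hc, PySem.List.slice_natCast]
  have harith : i + p.length - i = p.length := by omega
  rw [harith, Bool.eq_iff_iff]
  simp only [Bool.and_eq_true, decide_eq_true_eq, beq_iff_eq, PySem.Chars.startswith,
    List.isPrefixOf_iff_prefix]
  constructor
  · rintro ⟨hle, heq⟩
    exact heq ▸ List.take_prefix _ _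
  · intro hp
    have hl : p.length ≤ (cs.drop i).length := hp.length_le
    simp only [List.length_drop] at hl
    refine ⟨by omega, ?_⟩
    rw [List.prefix_iff_eq_take] at hp
    exact hp.symm

-- the two break tests agree at every in-range position
lemma pvBreak_eq (cs : List Char) (i : Nat) (hi : i < cs.length) :
    pvBreakA cs i = pvBreakB cs i := by
  have h1 := pvStarts_eq cs i ['\n','\n'] (le_of_lt hi)
  have h2 := pvStarts_eq cs i ['\r','\n','\r','\n'] (le_of_lt hi)
  have h3 : decide (i < cs.length - 1) = decide (i + 1 < cs.length) := by
    simp only [decide_eq_decide]; omega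
  have h4 : (".?!".toList) = ['.','?','!'] := rfl
  simp only [pvBreakA, pvBreakB, List.any_cons, List.any_nil, Bool.or_false, h1, h2, h3, h4,
    Bool.or_assoc]

-- appending the next character extends the slice by one
lemma pvTake_ext (cs : List Char) (a i : Nat) (ha : a ≤ i) (hi : i < cs.length) :
    (cs.drop a).take (i-a) ++ [cs[i]] = (cs.drop a).take (i+1-a) := by
  have h1 : i + 1 - a = (i - a) + 1 := by omega
  rw [h1, List.take_add_one]
  have h2 : (cs.drop a)[i-a]? = some cs[i] := by
    rw [List.getElem?_drop]
    have : a + (i - a) = i := by omega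
    rw [this, List.getElem?_eq_getElem hi]
  rw [h2]
  rfl

lemma pvTake_split (cs : List Char) (a b c : Nat) (hab : a ≤ b) (hbc : b ≤ c) :
    (cs.drop a).take (c-a) = (cs.drop a).take (b-a) ++ (cs.drop b).take (c-b) := by
  have h1 : c - a = (b - a) + (c - b) := by omega
  have h2 : (cs.drop a).drop (b-a) = cs.drop b := by
    rw [List.drop_drop]
    congr 1
    omega
  rw [h1, List.take_add, h2]

-- scanning equivalence: A's accumulated current_chunk is the slice cs[a:i]; B's
-- start index b satisfies a ≤ b ≤ i and cs[a:b] is all whitespace (the case in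
-- which A keeps a whitespace-only current_chunk while B has already moved start)
lemma pvScan_eq (cs : List Char) :
    ∀ n i a b chunks, cs.length - i ≤ n → a ≤ b → b ≤ i →
      (∀ c ∈ (cs.drop a).take (b-a), PySem.Chars.isspace c) →
      pvScanA cs i chunks ((cs.drop a).take (i-a)) = pvScanB cs b i chunks := by
  intro n
  induction n with
  | zero =>
    intro i a b chunks hn hab hbi hw
    rw [pvScanA, pvScanB]
    have hi : ¬ i < cs.length := by omega
    simp [hi]
  | succ n ih =>
    intro i a b chunks hn hab hbi hw
    rw [pvScanA, pvScanB]
    by_cases hi : i < cs.length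
    · simp only [dif_pos hi, if_pos hi]
      rw [pvBreak_eq cs i hi, pvTake_ext cs a i (le_trans hab hbi) hi]
      have hcast : ((i : Int) + 1) = ((i + 1 : Nat) : Int) := by push_cast; ring
      rw [hcast, PySem.List.slice_natCast]
      by_cases hbr : pvBreakB cs i = true
      · simp only [if_pos hbr]
        have hsplit := pvTake_split cs a b (i+1) hab (by omega)
        have hst : PySem.Chars.strip ((cs.drop a).take (i+1-a))
            = PySem.Chars.strip ((cs.drop b).take (i+1-b)) := by
          rw [hsplit, pvStrip_prepend_space _ _ hw]
        rw [hst]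
        by_cases hp : PySem.Chars.strip ((cs.drop b).take (i+1-b)) = []
        · simp only [hp, ne_eq, not_true_eq_false, if_false]
          have hw' : ∀ c ∈ (cs.drop a).take ((i+1)-a), PySem.Chars.isspace c := by
            rw [← hst] at hp
            exact (pvStrip_eq_nil_iff _).mp hp
          exact ih (i+1) a (i+1) chunks (by omega) (by omega) le_rfl hw'
        · simp only [hp, ne_eq, not_false_eq_true, if_true]
          have := ih (i+1) (i+1) (i+1) (chunks ++ [PySem.Chars.strip ((cs.drop b).take (i+1-b))])
            (by omega) le_rfl le_rfl (by simp)
          simpa using this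
      · simp only [hbr]
        exact ih (i+1) a b chunks (by omega) hab (by omega) hw
    · simp [hi]

-- list surgery facts for A's in-place merge loop
lemma pvGetD_mid (res : List (List Char)) (cur : List Char) (rest : List (List Char)) :
    (res ++ cur :: rest).getD res.length [] = cur := by
  induction res with
  | nil => rfl
  | cons d res ih => simpa using ih

lemma pvGetD_mid1 (res : List (List Char)) (cur c : List Char) (rest : List (List Char)) :
    (res ++ cur :: c :: rest).getD (res.length + 1) [] = c := by
  induction res with
  | nil => rfl
  | cons d res ih => simpa using ih

lemma pvFwd (res : List (List Char)) (cur c : List Char) (rest : List (List Char)) (v : List Char) :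
    ((res ++ cur :: c :: rest).set (res.length + 1) v).eraseIdx res.length = res ++ v :: rest := by
  induction res with
  | nil => rfl
  | cons d res ih => simpa using ih

lemma pvBack (r : List (List Char)) (l cur v : List Char) :
    (((r ++ [l]) ++ [cur]).set r.length v).eraseIdx (r.length + 1) = r ++ [v] := by
  induction r with
  | nil => rfl
  | cons d r ih => simpa using ih

lemma pvGetD_last2 (r : List (List Char)) (l cur : List Char) :
    ((r ++ [l]) ++ [cur]).getD r.length [] = l := by
  induction r with
  | nil => rfl
  | cons d r ih => simpa using ih

lemma pvMergeB_single (cur : List Char) : pvMergeB [] cur [] = [cur] := by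
  rw [pvMergeB]
  split_ifs <;> simp_all

-- merge equivalence: A with chunks = res ++ cur :: rest and i = |res| equals B's
-- single forward pass with emitted prefix res and current chunk cur
lemma pvMerge_eq (rest : List (List Char)) :
    ∀ res cur, pvMergeA (res ++ cur :: rest) res.length = pvMergeB res cur rest := by
  induction rest with
  | nil =>
    intro res cur
    rw [pvMergeA]
    have h : res.length < (res ++ [cur]).length := by simp
    rw [dif_pos h, pvGetD_mid]
    by_cases h10 : cur.length < 10
    · rw [if_pos h10]
      have hlast : res.length = (res ++ [cur]).length - 1 := by simp
      rw [if_pos hlast]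
      by_cases hres : 0 < res.length
      · rw [if_pos hres]
        obtain ⟨r, l, rfl⟩ : ∃ r l, res = r ++ [l] := by
          rcases List.eq_nil_or_concat res with hn | ⟨r, l, hc⟩
          · simp [hn] at hres
          · exact ⟨r, l, by simpa [List.concat_eq_append] using hc⟩
        have hi1 : (r ++ [l]).length - 1 = r.length := by simp
        rw [hi1, pvGetD_last2]
        have hlen : (r ++ [l]).length = r.length + 1 := by simp
        rw [hlen, pvBack, pvMergeA]
        have hnot : ¬ (r.length + 1 < (r ++ [l ++ [' '] ++ cur]).length) := by simp
        rw [dif_neg hnot, pvMergeB]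
        rw [if_neg (by omega), if_neg (by simp)]
        rw [List.dropLast_concat]
        simp [List.getLast!_eq_getLast?_getD]
      · rw [if_neg hres]
        have hnil : res = [] := by
          cases res with
          | nil => rfl
          | cons d t => simp at hres
        subst hnil
        rw [pvMergeB]
        rw [if_neg (by omega), if_pos rfl]
        rfl
    · rw [if_neg h10, pvMergeA]
      have hnot : ¬ (res.length + 1 < (res ++ [cur]).length) := by simp
      rw [dif_neg hnot, pvMergeB, if_pos (by omega)]
  | cons c rest' ih =>
    intro res cur
    rw [pvMergeA]
    have h : res.length < (res ++ cur :: c :: rest').length := by simp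
    rw [dif_pos h, pvGetD_mid]
    by_cases h10 : cur.length < 10
    · rw [if_pos h10]
      have hne : ¬ (res.length = (res ++ cur :: c :: rest').length - 1) := by simp
      rw [if_neg hne]
      rw [pvGetD_mid1, pvFwd]
      by_cases hz : res.length = 0 ∧ (res ++ (cur ++ [' '] ++ c) :: rest').length = 1
      · rw [if_pos hz]
        obtain ⟨hz1, hz2⟩ := hz
        have hres : res = [] := List.eq_nil_of_length_eq_zero hz1
        subst hres
        have hrest : rest' = [] := by simpa using hz2
        subst hrest
        rw [pvMergeB, if_neg (by omega)]
        exact (pvMergeB_single _).symm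
      · rw [if_neg hz, ih res (cur ++ [' '] ++ c), pvMergeB]
        rw [if_neg (by omega)]
    · rw [if_neg h10]
      have hassoc : res ++ cur :: c :: rest' = (res ++ [cur]) ++ c :: rest' := by simp
      have hlen : res.length + 1 = (res ++ [cur]).length := by simp
      rw [hassoc, hlen, ih (res ++ [cur]) c, pvMergeB]
      rw [if_pos (by omega)]

lemma pvMerge0_eq (chunks : List (List Char)) : pvMergeA chunks 0 = pvMergeB0 chunks := by
  cases chunks with
  | nil => rw [pvMergeA]; rfl
  | cons c rest => simpa using pvMerge_eq rest [] c

-- ===== VERDICT (by name: the statement is the Claim_ definition above) =====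
theorem split_solution_into_chunks_spec : Claim_equal_split_solution_into_chunks := by
  intro s _
  unfold Spec_split_solution_into_chunks split_solution_into_chunks split_solution_into_chunks_alt
  have hscan : pvScanA (pvThinkStrip s) 0 [] [] = pvScanB (pvThinkStrip s) 0 0 [] := by
    have := pvScan_eq (pvThinkStrip s) (pvThinkStrip s).length 0 0 0 []
      (by omega) (le_refl 0) (le_refl 0) (by simp)
    simpa using this
  simp only [hscan, pvMerge0_eq]
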